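-- pv_equiv track=rewrite | github.com/CertifiedErickBaps/Python36 | Examen4/sietes.py | sietes
-- ===== SOURCE A (Python) =====
-- def siete(n):
--     s = []
--     for c in range(1, n):
--         if c % 10 == 0:
--             a = c + 7
--             s.append(a)
--     return s
--
-- def sietes(n):
--     s = []
--     for c in range(1, n + 1):
--         if c % 7 == 0:
--             s.append(c)
--         elif c in siete(n):
--             s.append(c)
--
--     return s
-- ===== SOURCE B (Python) =====
-- def sietes(n):
--     # single pass: c is appended iff c % 7 == 0 or c ends in digit 7
--     return [c for c in range(1, n + 1) if c % 7 == 0 or c % 10 == 7]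
-- ===== Notes on version B (the rewrite author's own statement) =====
-- stated objective: simpler
-- what changed: Replaces the quadratic rebuild-the-siete-table-and-scan-it-per-element loop with one pass over range(1, n+1) using the closed-form modular test c % 7 == 0 or c % 10 == 7.
import Mathlib
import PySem

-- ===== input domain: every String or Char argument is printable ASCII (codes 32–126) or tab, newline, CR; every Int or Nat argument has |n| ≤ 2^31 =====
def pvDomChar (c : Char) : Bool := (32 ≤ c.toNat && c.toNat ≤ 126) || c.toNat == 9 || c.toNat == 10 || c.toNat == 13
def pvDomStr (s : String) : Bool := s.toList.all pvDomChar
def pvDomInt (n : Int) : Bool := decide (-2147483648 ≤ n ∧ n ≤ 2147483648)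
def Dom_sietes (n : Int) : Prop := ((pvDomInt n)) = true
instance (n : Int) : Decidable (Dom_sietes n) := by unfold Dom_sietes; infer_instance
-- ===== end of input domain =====

-- B replaces A's quadratic table-plus-membership-scan with one linear pass using c % 7 == 0 or c % 10 == 7.

-- ===== PORT A =====
def siete (n : Int) : List Int :=
  (PySem.List.pyRange 1 n 1).foldl
    (fun s c => if PySem.Int.mod c 10 == 0 then s ++ [c + 7] else s) []

def sietes (n : Int) : List Int :=
  (PySem.List.pyRange 1 (n + 1) 1).foldl
    (fun s c =>
      if PySem.Int.mod c 7 == 0 then s ++ [c]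
      else if (siete n).contains c then s ++ [c]
      else s) []

-- ===== PORT B =====
def sietes_alt (n : Int) : List Int :=
  (PySem.List.pyRange 1 (n + 1) 1).filter
    (fun c => PySem.Int.mod c 7 == 0 || PySem.Int.mod c 10 == 7)

-- ===== PRECONDITION & SPEC =====
def Spec_sietes (n : Int) (out : List Int) : Prop := out = sietes_alt n
instance (n : Int) (out : List Int) : Decidable (Spec_sietes n out) := by unfold Spec_sietes; infer_instance

-- ===== CLAIM (what is proved, stated in full; the proofs are below) =====
def Claim_equal_sietes : Prop := ∀ (n : Int), Dom_sietes n → Spec_sietes n (sietes n)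

-- ===== LEMMAS AND PROOFS =====

theorem siete_eq_map_filter (n : Int) :
    siete n = ((PySem.List.pyRange 1 n 1).filter
      (fun c => PySem.Int.mod c 10 == 0)).map (· + 7) := by
  unfold siete
  rw [PySem.List.foldl_append_if]
  simp

theorem mem_siete_iff (n c : Int) (h1 : 1 ≤ c) (h2 : c < n + 1)
    (h7 : ¬ PySem.Int.mod c 7 = 0) :
    (siete n).contains c = (PySem.Int.mod c 10 == 7) := by
  have hm10 : PySem.Int.mod c 10 = c % 10 := PySem.Int.mod_eq_emod_of_pos (by omega)
  have hm7 : PySem.Int.mod c 7 = c % 7 := PySem.Int.mod_eq_emod_of_pos (by omega)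
  have hc7 : c % 7 ≠ 0 := by rwa [hm7] at h7
  have key : c ∈ siete n ↔ c % 10 = 7 := by
    rw [siete_eq_map_filter]
    simp only [List.mem_map, List.mem_filter, PySem.List.mem_pyRange_one, beq_iff_eq]
    constructor
    · rintro ⟨a, ⟨⟨ha1, ha2⟩, hmod⟩, hac⟩
      rw [PySem.Int.mod_eq_emod_of_pos (by omega : (0:Int) < 10)] at hmod
      omega
    · intro hc
      refine ⟨c - 7, ⟨⟨by omega, by omega⟩, ?_⟩, by omega⟩
      rw [PySem.Int.mod_eq_emod_of_pos (by omega : (0:Int) < 10)]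
      omega
  rw [Bool.eq_iff_iff]
  simp only [List.contains_eq_mem, decide_eq_true_eq, beq_iff_eq, hm10]
  exact key

theorem sietes_eq_alt (n : Int) : sietes n = sietes_alt n := by
  unfold sietes sietes_alt
  rw [PySem.List.foldl_congr_mem
    (g := fun s c => if (PySem.Int.mod c 7 == 0 || PySem.Int.mod c 10 == 7)
      then s ++ [c] else s)]
  · rw [PySem.List.foldl_append_if_eq_filter]
    simp
  · intro acc x hx
    rw [PySem.List.mem_pyRange_one] at hx
    by_cases h7 : PySem.Int.mod x 7 = 0
    · have ht : (PySem.Int.mod x 7 == 0) = true := by rw [h7]; decide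
      simp only [ht, Bool.true_or, if_true]
    · have hf : (PySem.Int.mod x 7 == 0) = false := by simpa using h7
      rw [mem_siete_iff n x hx.1 hx.2 h7]
      simp only [hf, Bool.false_or]
      simp

-- ===== VERDICT (by name: the statement is the Claim_ definition above) =====
theorem sietes_spec : Claim_equal_sietes := by
  intro n _
  unfold Spec_sietes
  exact sietes_eq_alt n
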